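-- pv_equiv track=rewrite | github.com/Asrar-Ahammad/tcs_interview_practice | arrays/12_insert_in_array.py | insert_in_beginning
-- ===== SOURCE A (Python) =====
-- def insert_in_beginning(arr, ele):
--     arr.append(ele)
--     n = len(arr) - 1
--     while n > 0:
--         arr[n] = arr[n - 1]
--         n -= 1
--     arr[0] = ele
--     return arr
-- ===== SOURCE B (Python) =====
-- def insert_in_beginning(arr, ele):
--     arr[:] = [ele] + arr
--     return arr
-- ===== Notes on version B (the rewrite author's own statement) =====
-- stated objective: simpler
-- what changed: Replaces A's append-then-shift loop (per-element movement in Python bytecode) with building [ele]+arr and writing it back via slice assignment, keeping the in-place mutation and returned identity.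
import Mathlib
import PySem

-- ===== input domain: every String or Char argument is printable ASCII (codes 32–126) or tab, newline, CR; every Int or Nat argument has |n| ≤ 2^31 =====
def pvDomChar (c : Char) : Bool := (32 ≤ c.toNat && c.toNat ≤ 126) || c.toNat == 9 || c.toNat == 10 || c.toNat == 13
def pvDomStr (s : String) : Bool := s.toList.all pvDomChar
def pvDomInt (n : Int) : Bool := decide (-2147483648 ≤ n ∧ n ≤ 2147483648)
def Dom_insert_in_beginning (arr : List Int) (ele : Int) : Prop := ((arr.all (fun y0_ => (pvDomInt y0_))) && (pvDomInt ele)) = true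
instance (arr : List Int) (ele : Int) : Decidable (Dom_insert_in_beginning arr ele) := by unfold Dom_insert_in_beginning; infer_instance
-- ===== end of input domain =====

-- B builds [ele] ++ arr directly instead of A's append-then-shift loop; both Pythons mutate arr in place,
-- the equivalence proved here is about the RETURN value (B performs the same observable mutation via slice assignment).

-- ===== PORT A =====
-- the while loop: while n > 0: arr[n] = arr[n-1]; n -= 1  (indices are always in range; getD 0 never fires)
def pvShiftLoop (a : List Int) (n : Nat) : List Int :=
  match n with
  | 0 => a
  | m + 1 => pvShiftLoop (a.set (m + 1) (a.getD m 0)) m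

def insert_in_beginning (arr : List Int) (ele : Int) : List Int :=
  let a := arr ++ [ele]          -- arr.append(ele)
  let a := pvShiftLoop a (a.length - 1)
  a.set 0 ele                    -- arr[0] = ele

-- ===== PORT B =====
def insert_in_beginning_alt (arr : List Int) (ele : Int) : List Int :=
  [ele] ++ arr

-- ===== PRECONDITION & SPEC =====
def Spec_insert_in_beginning (arr : List Int) (ele : Int) (out : List Int) : Prop := out = insert_in_beginning_alt arr ele
instance (arr : List Int) (ele : Int) (out : List Int) : Decidable (Spec_insert_in_beginning arr ele out) := by unfold Spec_insert_in_beginning; infer_instance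

-- ===== CLAIM (what is proved, stated in full; the proofs are below) =====
def Claim_equal_insert_in_beginning : Prop := ∀ (arr : List Int) (ele : Int), Dom_insert_in_beginning arr ele → Spec_insert_in_beginning arr ele (insert_in_beginning arr ele)

-- ===== LEMMAS AND PROOFS =====

-- after the loop, positions 1..n hold the former a[0..n-1]; position 0 and positions > n are unchanged
theorem pvShiftLoop_eq (a : List Int) (n : Nat) (h : n < a.length) :
    pvShiftLoop a n = a.take 1 ++ a.take n ++ a.drop (n + 1) := by
  induction n generalizing a with
  | zero =>
    simp [pvShiftLoop]
    cases a with
    | nil => simp at h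
    | cons x xs => simp
  | succ m ih =>
    have hlen : ((a.set (m + 1) (a.getD m 0)).length) = a.length := by simp
    rw [pvShiftLoop, ih _ (by omega)]
    have hm : m < a.length := by omega
    have h1 : (a.set (m + 1) (a.getD m 0)).take 1 = a.take 1 := by
      rw [List.take_set_of_le]; omega
    have h2 : (a.set (m + 1) (a.getD m 0)).take m = a.take m := by
      rw [List.take_set_of_le]; omega
    have hg : a.getD m 0 = a[m] := by
      simp [List.getD_eq_getElem?_getD, List.getElem?_eq_getElem hm]
    have h3 : (a.set (m + 1) (a.getD m 0)).drop (m + 1) = a.getD m 0 :: a.drop (m + 2) := by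
      rw [hg]
      have hd := List.drop_set (l := a) (i := m + 1) (a := a[m]) (j := m + 1)
      simp at hd
      rw [hd]
      have he : a.drop (m + 1) = a[m + 1] :: a.drop (m + 2) := by
        rw [List.drop_eq_getElem_cons h]
      rw [he]
      rfl
    rw [h1, h2, h3, hg]
    have h4 : a.take m ++ a[m] :: a.drop (m + 2) = a.take (m + 1) ++ a.drop (m + 2) := by
      rw [List.take_add_one (l := a) (i := m), List.getElem?_eq_getElem hm, List.append_assoc]
      rfl
    rw [List.append_assoc, h4, List.append_assoc]

theorem insert_in_beginning_eq (arr : List Int) (ele : Int) :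
    insert_in_beginning arr ele = ele :: arr := by
  unfold insert_in_beginning
  cases arr with
  | nil => simp [pvShiftLoop]
  | cons x xs =>
    have h : xs.length + 1 < ((x :: xs) ++ [ele]).length := by simp
    simp only [List.length_append, List.length_cons, List.length_nil]
    have hn : xs.length + 1 + (0 + 1) - 1 = xs.length + 1 := by omega
    rw [hn, pvShiftLoop_eq _ _ h]
    simp [List.take_append_of_le_length]

-- ===== VERDICT (by name: the statement is the Claim_ definition above) =====
theorem insert_in_beginning_spec : Claim_equal_insert_in_beginning := by
  intro arr ele _
  show _ = _
  rw [insert_in_beginning_eq]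
  rfl
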